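-- pv_equiv track=rewrite | github.com/LimenResearch/gpa | perscomb/weighted_graph.py | get_maximum_steady_persistence
-- ===== SOURCE A (Python) =====
-- def get_maximum_steady_persistence(array):
--     """Return list of consecutive lists of numbers from vals (number list)."""
--     sub_persistence = []
--     sub_persistences = [sub_persistence]
--     consecutive = None
--
--     for value in array:
--         if (value == consecutive) or (consecutive is None):
--             sub_persistence.append(value)
--         else:
--             sub_persistence = [value]
--             sub_persistences.append(sub_persistence)
--         consecutive = value + 1
--
--     sub_persistences.sort(key=len)
--
--     return sub_persistences
-- ===== SOURCE B (Python) =====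
-- def get_maximum_steady_persistence(array):
--     """Return list of consecutive lists of numbers from vals (number list)."""
--     if not array:
--         return [[]]
--     *init, last = array
--     runs = []
--     run = [last]              # current run, kept back-to-front
--     for v in reversed(init):
--         if run[-1] == v + 1:
--             run.append(v)
--         else:
--             runs.append(run[::-1])
--             run = [v]
--     runs.append(run[::-1])
--     runs.reverse()
--     return sorted(runs, key=len)
-- ===== Notes on version B (the rewrite author's own statement) =====
-- stated objective: alternative
-- what changed: Replaces A's forward accumulator loop with aliased mutable state (the current run is the same object as the last element of the result list) by a back-to-front pass over the reversed list that keeps the current run reversed and reverses completed runs on the way out, followed by the same stable sort by length.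
import Mathlib
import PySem

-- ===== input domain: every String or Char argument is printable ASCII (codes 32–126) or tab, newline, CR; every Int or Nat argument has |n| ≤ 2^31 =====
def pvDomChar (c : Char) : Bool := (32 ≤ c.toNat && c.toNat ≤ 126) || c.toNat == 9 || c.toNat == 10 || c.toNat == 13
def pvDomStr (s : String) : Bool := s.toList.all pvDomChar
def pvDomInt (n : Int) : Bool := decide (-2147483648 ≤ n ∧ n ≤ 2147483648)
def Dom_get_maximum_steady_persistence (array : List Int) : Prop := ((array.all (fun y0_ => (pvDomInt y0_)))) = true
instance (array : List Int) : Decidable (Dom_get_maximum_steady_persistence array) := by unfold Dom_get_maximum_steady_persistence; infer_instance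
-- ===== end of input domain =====

-- B replaces A's forward loop with aliased mutable state by a back-to-front pass over the
-- reversed list that keeps the current run reversed; same stable sort by length (objective: alternative).

-- ===== PORT A =====
-- A's loop state: sub_persistences = prev ++ [cur] (the Python aliases the last list as
-- sub_persistence); consec models the 'consecutive' variable (none = Python None).
def pvLoopA : List Int → List (List Int) → List Int → Option Int → List (List Int)
  | [], prev, cur, _ => prev ++ [cur]
  | v :: vs, prev, cur, consec =>
    if consec == some v || consec == none then
      pvLoopA vs prev (cur ++ [v]) (some (v + 1))
    else
      pvLoopA vs (prev ++ [cur]) [v] (some (v + 1))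

def get_maximum_steady_persistence (array : List Int) : List (List Int) :=
  PySem.List.sorted (pvLoopA array [] [] none) (fun g => g.length) false

-- ===== PORT B =====
-- the loop body of Source B; run (= st.2) is never empty, so run[-1] is its getLast?
def pvStepB (st : List (List Int) × List Int) (v : Int) : List (List Int) × List Int :=
  if st.2.getLast? == some (v + 1) then (st.1, st.2 ++ [v])
  else (st.1 ++ [st.2.reverse], [v])

def get_maximum_steady_persistence_alt (array : List Int) : List (List Int) :=
  match array with
  | [] => [[]]
  | _ =>
    -- *init, last = array  (array is nonempty here, so getLastD's default is never used)
    let init := array.dropLast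
    let last := array.getLastD 0
    let st := init.reverse.foldl pvStepB ([], [last])
    let runs := (st.1 ++ [st.2.reverse]).reverse
    PySem.List.sorted runs (fun g => g.length) false

-- ===== PRECONDITION & SPEC =====
def Spec_get_maximum_steady_persistence (array : List Int) (out : List (List Int)) : Prop := out = get_maximum_steady_persistence_alt array
instance (array : List Int) (out : List (List Int)) : Decidable (Spec_get_maximum_steady_persistence array out) := by unfold Spec_get_maximum_steady_persistence; infer_instance

-- ===== CLAIM (what is proved, stated in full; the proofs are below) =====
def Claim_equal_get_maximum_steady_persistence : Prop := ∀ (array : List Int), Dom_get_maximum_steady_persistence array → Spec_get_maximum_steady_persistence array (get_maximum_steady_persistence array)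

-- ===== LEMMAS AND PROOFS =====

-- Proof-side characterisation of both programs: the maximal consecutive runs, by structural recursion.
def pvRunsB : List Int → List (List Int)
  | [] => [[]]
  | [x] => [[x]]
  | x :: y :: rest =>
    let r := pvRunsB (y :: rest)
    if x + 1 == y then (x :: r.headD []) :: r.tail
    else [x] :: r

-- A's loop on a nonempty remainder, with a known 'consecutive' value, in terms of the runs.
theorem pvLoopA_eq_runs (x : Int) (vs : List Int) :
    ∀ (prev : List (List Int)) (cur : List Int) (c : Int),
      pvLoopA (x :: vs) prev cur (some c) =
        if c = x then prev ++ ((cur ++ (pvRunsB (x :: vs)).headD []) :: (pvRunsB (x :: vs)).tail)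
        else (prev ++ [cur]) ++ pvRunsB (x :: vs) := by
  induction vs generalizing x with
  | nil =>
    intro prev cur c
    by_cases h : c = x
    · subst h
      simp [pvLoopA, pvRunsB]
    · simp [pvLoopA, pvRunsB, h]
  | cons y rest ih =>
    intro prev cur c
    by_cases h : c = x
    · subst h
      rw [show pvLoopA (c :: y :: rest) prev cur (some c)
            = pvLoopA (y :: rest) prev (cur ++ [c]) (some (c + 1)) by
          simp [pvLoopA]]
      rw [ih y prev (cur ++ [c]) (c + 1)]
      by_cases hy : c + 1 = y
      · simp [pvRunsB, hy]
      · simp [pvRunsB, hy]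
    · rw [show pvLoopA (x :: y :: rest) prev cur (some c)
            = pvLoopA (y :: rest) (prev ++ [cur]) [x] (some (x + 1)) by
          simp [pvLoopA, h]]
      rw [ih y (prev ++ [cur]) [x] (x + 1)]
      by_cases hy : x + 1 = y
      · simp [pvRunsB, hy, h]
      · simp [pvRunsB, hy, h]

theorem pvLoopA_start (array : List Int) :
    pvLoopA array [] [] none = pvRunsB array := by
  cases array with
  | nil => simp [pvLoopA, pvRunsB]
  | cons x vs =>
    rw [show pvLoopA (x :: vs) [] [] none = pvLoopA vs [] [x] (some (x + 1)) by
        simp [pvLoopA]]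
    cases vs with
    | nil => simp [pvLoopA, pvRunsB]
    | cons y rest =>
      rw [pvLoopA_eq_runs y rest [] [x] (x + 1)]
      by_cases hy : x + 1 = y
      · simp [pvRunsB, hy]
      · simp [pvRunsB, hy]

-- The first run of pvRunsB (y :: w) starts with y.
theorem pvRunsB_head (y : Int) (w : List Int) :
    ∃ g gs, pvRunsB (y :: w) = (y :: g) :: gs := by
  induction w generalizing y with
  | nil => exact ⟨[], [], rfl⟩
  | cons z w' ih =>
    obtain ⟨g', gs', h'⟩ := ih z
    by_cases hy : y + 1 = z
    · exact ⟨z :: g', gs', by simp [pvRunsB, hy, h']⟩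
    · exact ⟨[], (z :: g') :: gs', by simp [pvRunsB, hy, h']⟩

-- B's fold in terms of the runs.
theorem pvFoldB_eq_runs (z : Int) : ∀ (u : List Int),
    pvRunsB (u ++ [z]) =
      (u.foldr (fun v t => pvStepB t v) ([], [z])).2.reverse
        :: (u.foldr (fun v t => pvStepB t v) ([], [z])).1.reverse := by
  intro u
  induction u with
  | nil => simp [pvRunsB]
  | cons v u ih =>
    obtain ⟨y, w, huz⟩ : ∃ y w, u ++ [z] = y :: w := by cases u <;> exact ⟨_, _, rfl⟩
    obtain ⟨g, gs, hhead⟩ := pvRunsB_head y w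
    rw [huz] at ih
    rw [show (v :: u) ++ [z] = v :: y :: w by rw [List.cons_append, huz], List.foldr_cons]
    generalize hst : u.foldr (fun v t => pvStepB t v) (([], [z]) : List (List Int) × List Int) = st at ih ⊢
    obtain ⟨rs, r⟩ := st
    obtain ⟨h2, h1⟩ := List.cons_eq_cons.mp (ih.symm.trans hhead)
    have hlast : r.getLast? = some y := by
      rw [← List.head?_reverse, h2]; rfl
    by_cases hv : v + 1 = y
    · subst hv
      simp [pvStepB, hlast, pvRunsB, ih]
    · have hcond : ¬ (r.getLast? = some (v + 1)) := by
        rw [hlast]; intro h; exact hv (Option.some.inj h).symm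
      simp [pvStepB, hcond, pvRunsB, hv, ih]

-- ===== VERDICT (by name: the statement is the Claim_ definition above) =====
theorem get_maximum_steady_persistence_spec : Claim_equal_get_maximum_steady_persistence := by
  intro array _
  unfold Spec_get_maximum_steady_persistence get_maximum_steady_persistence
    get_maximum_steady_persistence_alt
  rw [pvLoopA_start]
  cases array with
  | nil => decide
  | cons x vs =>
    have hsplit : ∀ (x : Int) (vs : List Int),
        (x :: vs).dropLast ++ [(x :: vs).getLastD 0] = x :: vs := by
      intro x vs
      induction vs generalizing x with
      | nil => rfl
      | cons y t ih => simpa using ih y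
    simp only [List.foldl_reverse]
    rw [show ∀ (st : List (List Int) × List Int),
          (st.1 ++ [st.2.reverse]).reverse = st.2.reverse :: st.1.reverse from
        fun st => by simp]
    rw [← pvFoldB_eq_runs ((x :: vs).getLastD 0) ((x :: vs).dropLast), hsplit]
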